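-- pv_equiv track=rewrite | github.com/tlijkkkk/mark_v | leetcode-practice/leetcode_practice/data_structure/dict/leetcode1679_max_num_k_sum_pairs.py | max_num_k_sum_pair
-- ===== SOURCE A (Python) =====
-- from typing import List, Dict
-- from collections import defaultdict
--
-- def max_num_k_sum_pair(nums: List[int], k: int) -> int:
--     ht: Dict[int, int] = defaultdict(int)
--     count = 0
--
--     for num in nums:
--         if k - num in ht:
--             ht[k - num] -= 1
--             if ht[k - num] == 0:
--                 ht.pop(k - num)
--             count += 1
--         else:
--             ht[num] += 1
--
--     return count
-- ===== SOURCE B (Python) =====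
-- def max_num_k_sum_pair(nums, k):
--     c = {}
--     for x in nums:
--         c[x] = c.get(x, 0) + 1
--     total = 0
--     for v, n in c.items():
--         w = k - v
--         if v < w:
--             total += min(n, c.get(w, 0))
--         elif v == w:
--             total += n // 2
--     return total
-- ===== Notes on version B (the rewrite author's own statement) =====
-- stated objective: alternative
-- what changed: B replaces A's streaming greedy (a mutable dict of yet-unmatched values, matching each element as it arrives) by building a frequency counter once and returning the closed-form sum of min(c[v], c[k-v]) over distinct values v < k-v plus c[k/2]//2 for the self-pair value.
import Mathlib
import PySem

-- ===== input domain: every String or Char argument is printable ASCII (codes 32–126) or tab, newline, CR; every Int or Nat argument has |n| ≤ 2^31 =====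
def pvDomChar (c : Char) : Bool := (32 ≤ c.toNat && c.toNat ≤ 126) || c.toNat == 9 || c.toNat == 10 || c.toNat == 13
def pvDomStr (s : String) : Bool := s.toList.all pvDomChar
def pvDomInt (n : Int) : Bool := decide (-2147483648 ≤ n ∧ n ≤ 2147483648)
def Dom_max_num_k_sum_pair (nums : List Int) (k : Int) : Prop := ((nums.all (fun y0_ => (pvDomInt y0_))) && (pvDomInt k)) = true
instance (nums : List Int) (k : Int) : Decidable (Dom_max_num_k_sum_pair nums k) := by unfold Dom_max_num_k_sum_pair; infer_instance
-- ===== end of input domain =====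

-- B replaces A's streaming greedy matching (mutable dict of unmatched values) by a
-- frequency counter built once plus a closed-form sum over the distinct values
-- (objective: alternative; same return value, neither mutates its arguments).

-- ===== PORT A =====
-- literal port of A: one pass, dict of unmatched values, match-or-stash each element
def max_num_k_sum_pair (nums : List Int) (k : Int) : Int :=
  (nums.foldl
    (fun (st : PySem.Dict Int Int × Int) num =>
      let ht := st.1
      let count := st.2
      if (ht.get? (k - num)).isSome then
        let v := ht.getD (k - num) 0 - 1
        let ht' := if v = 0 then ht.erase (k - num) else ht.insert (k - num) v
        (ht', count + 1)
      else
        (ht.insert num (ht.getD num 0 + 1), count))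
    (PySem.Dict.empty, 0)).2

-- ===== PORT B =====
-- literal port of B (Source B): build a counter, then sum min(c[v], c[k-v]) over the
-- distinct values v < k - v, plus c[k/2] // 2 for the self-pair value
def max_num_k_sum_pair_alt (nums : List Int) (k : Int) : Int :=
  let c := nums.foldl (fun d x => d.insert x (d.getD x 0 + 1)) PySem.Dict.empty
  c.items.foldl
    (fun total vn =>
      let v := vn.1
      let n := vn.2
      let w := k - v
      if v < w then total + min n (c.getD w 0)
      else if v = w then total + PySem.Int.floordiv n 2
      else total)
    0

-- ===== PRECONDITION & SPEC =====
def Spec_max_num_k_sum_pair (nums : List Int) (k : Int) (out : Int) : Prop := out = max_num_k_sum_pair_alt nums k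
instance (nums : List Int) (k : Int) (out : Int) : Decidable (Spec_max_num_k_sum_pair nums k out) := by unfold Spec_max_num_k_sum_pair; infer_instance

-- ===== CLAIM (what is proved, stated in full; the proofs are below) =====
def Claim_equal_max_num_k_sum_pair : Prop := ∀ (nums : List Int) (k : Int), Dom_max_num_k_sum_pair nums k → Spec_max_num_k_sum_pair nums k (max_num_k_sum_pair nums k)

-- ===== LEMMAS AND PROOFS =====

-- occurrence count as an Int
def pvCnt (xs : List Int) (v : Int) : Int := (xs.count v : Int)

-- B's per-distinct-value contribution
def pvTerm (xs : List Int) (k v : Int) : Int :=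
  if v < k - v then min (pvCnt xs v) (pvCnt xs (k - v))
  else if v = k - v then pvCnt xs v / 2
  else 0

-- the common abstract value: sum of contributions over the distinct elements
def pvPhi (xs : List Int) (k : Int) : Int := ∑ v ∈ xs.toFinset, pvTerm xs k v

theorem pv_toFinset_ofList (xs : List Int) : (PySem.Set.ofList xs).toFinset = xs.toFinset := by
  ext v; simp [PySem.Set.mem_ofList]

theorem pv_alt_eq_phi (xs : List Int) (k : Int) : max_num_k_sum_pair_alt xs k = pvPhi xs k := by
  unfold max_num_k_sum_pair_alt
  rw [PySem.Dict.foldl_insert_getD_add_one_eq_counter]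
  simp only [PySem.Dict.items_counter, PySem.Dict.getD_counter]
  have hstep : (fun (total : Int) (vn : Int × Int) =>
      if vn.1 < k - vn.1 then total + min vn.2 ((xs.count (k - vn.1) : Int))
      else if vn.1 = k - vn.1 then total + PySem.Int.floordiv vn.2 2
      else total)
    = fun total vn => total +
      (if vn.1 < k - vn.1 then min vn.2 ((xs.count (k - vn.1) : Int))
       else if vn.1 = k - vn.1 then PySem.Int.floordiv vn.2 2
       else 0) := by
    funext t vn; split_ifs <;> omega
  rw [hstep, PySem.List.foldl_add]
  rw [List.map_map]
  have hterm : ((fun vn : Int × Int =>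
      (if vn.1 < k - vn.1 then min vn.2 ((xs.count (k - vn.1) : Int))
       else if vn.1 = k - vn.1 then PySem.Int.floordiv vn.2 2
       else 0)) ∘ fun v => (v, (xs.count v : Int))) = pvTerm xs k := by
    funext v
    simp only [Function.comp, pvTerm, pvCnt, PySem.Int.floordiv]
    split_ifs <;> try rfl
    rw [Int.fdiv_eq_ediv]; simp
  rw [hterm, pvPhi, ← List.sum_toFinset _ (PySem.Set.nodup_ofList xs), pv_toFinset_ofList]; ring

-- number of unmatched occurrences of v in A's dict after processing xs
def pvF (xs : List Int) (k v : Int) : Int :=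
  if v = k - v then pvCnt xs v % 2 else max 0 (pvCnt xs v - pvCnt xs (k - v))

theorem pvCnt_append (xs : List Int) (x v : Int) :
    pvCnt (xs ++ [x]) v = pvCnt xs v + (if v = x then 1 else 0) := by
  simp [pvCnt, List.count_append]
  split_ifs with h <;> simp [List.count_singleton, h] 
  try omega

theorem pvCnt_nonneg (xs : List Int) (v : Int) : 0 ≤ pvCnt xs v := by
  simp [pvCnt]

theorem pv_term_append_ne (xs : List Int) (k x v : Int) (h1 : v ≠ x) (h2 : v ≠ k - x) :
    pvTerm (xs ++ [x]) k v = pvTerm xs k v := by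
  have h2' : ¬ (k - v = x) := by omega
  simp only [pvTerm, pvCnt_append, if_neg h1, if_neg h2', add_zero]

theorem pv_term_zero_of_not_mem (xs : List Int) (k x : Int) (h : x ∉ xs) :
    pvTerm xs k x = 0 := by
  have hc : pvCnt xs x = 0 := by simp [pvCnt, List.count_eq_zero_of_not_mem h]
  have h2 : 0 ≤ pvCnt xs (k - x) := pvCnt_nonneg xs (k - x)
  simp only [pvTerm, hc]
  split_ifs <;> omega

theorem pv_phi_append (xs : List Int) (k x : Int) :
    pvPhi (xs ++ [x]) k = pvPhi xs k + (if 0 < pvF xs k (k - x) then 1 else 0) := by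
  classical
  have hS' : (xs ++ [x]).toFinset = insert x xs.toFinset := by
    simp [List.toFinset_append]
  have hxS' : x ∈ (xs ++ [x]).toFinset := by rw [hS']; exact Finset.mem_insert_self _ _
  -- sum of old terms over the enlarged set is unchanged
  have hsum_old : ∑ v ∈ (xs ++ [x]).toFinset, pvTerm xs k v = pvPhi xs k := by
    rw [hS', pvPhi]
    by_cases hx : x ∈ xs.toFinset
    · rw [Finset.insert_eq_self.mpr hx]
    · rw [Finset.sum_insert hx, pv_term_zero_of_not_mem xs k x (by simpa using hx)]; ring
  -- the difference function is supported on {x, k - x}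
  set g : Int → Int := fun v => pvTerm (xs ++ [x]) k v - pvTerm xs k v with hg
  have hsupp : ∀ v ∈ (xs ++ [x]).toFinset, g v ≠ 0 → (v = x ∨ v = k - x) := by
    intro v _ hv
    by_contra hcon
    rw [not_or] at hcon
    exact hv (by simp [hg, pv_term_append_ne xs k x v hcon.1 hcon.2])
  have hsplit : pvPhi (xs ++ [x]) k = pvPhi xs k + ∑ v ∈ (xs ++ [x]).toFinset, g v := by
    have : ∑ v ∈ (xs ++ [x]).toFinset, g v
        = pvPhi (xs ++ [x]) k - ∑ v ∈ (xs ++ [x]).toFinset, pvTerm xs k v := by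
      rw [pvPhi, ← Finset.sum_sub_distrib]
    rw [this, hsum_old]; ring
  rw [hsplit]
  have hfilter : ∑ v ∈ (xs ++ [x]).toFinset, g v
      = ∑ v ∈ (xs ++ [x]).toFinset.filter (fun v => v = x ∨ v = k - x), g v :=
    (Finset.sum_filter_of_ne hsupp).symm
  have ha := pvCnt_nonneg xs x
  have hb := pvCnt_nonneg xs (k - x)
  by_cases hxx : x = k - x
  · -- self-pair value
    have hf : (xs ++ [x]).toFinset.filter (fun v => v = x ∨ v = k - x) = {x} := by
      ext v
      simp only [Finset.mem_filter, Finset.mem_singleton, ← hxx, or_self]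
      exact ⟨fun h => h.2, fun h => ⟨h ▸ hxS', h⟩⟩
    rw [hfilter, hf, Finset.sum_singleton]
    have hkk : ¬ (x < x) := lt_irrefl x
    simp [hg, pvTerm, pvF, pvCnt_append, ← hxx]
    omega
  · by_cases hmem : k - x ∈ (xs ++ [x]).toFinset
    · have hf : (xs ++ [x]).toFinset.filter (fun v => v = x ∨ v = k - x) = {x, k - x} := by
        ext v
        simp only [Finset.mem_filter, Finset.mem_insert, Finset.mem_singleton]
        constructor
        · exact fun h => h.2
        · rintro (rfl | rfl)
          · exact ⟨hxS', Or.inl rfl⟩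
          · exact ⟨hmem, Or.inr rfl⟩
      rw [hfilter, hf, Finset.sum_pair hxx]
      have hkx : k - (k - x) = x := by ring
      simp only [hg, pvTerm, pvF, pvCnt_append, hkx, if_neg hxx]
      split_ifs <;> omega
    · have hcb : pvCnt xs (k - x) = 0 := by
        have : k - x ∉ xs := by
          intro h; exact hmem (by simp [List.toFinset_append, h])
        simp [pvCnt, List.count_eq_zero_of_not_mem this]
      have hf : (xs ++ [x]).toFinset.filter (fun v => v = x ∨ v = k - x) = {x} := by
        ext v
        simp only [Finset.mem_filter, Finset.mem_singleton]
        constructor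
        · rintro ⟨hv, rfl | rfl⟩
          · rfl
          · exact absurd hv hmem
        · rintro rfl; exact ⟨hxS', Or.inl rfl⟩
      rw [hfilter, hf, Finset.sum_singleton]
      have hkx : k - (k - x) = x := by ring
      simp only [hg, pvTerm, pvF, pvCnt_append, hkx, hcb, if_neg hxx]
      split_ifs <;> omega

theorem pv_get?_erase (d : PySem.Dict Int Int) (k j : Int) :
    (d.erase k).get? j = if j = k then none else d.get? j := by
  rcases d with ⟨l⟩
  simp only [PySem.Dict.erase, PySem.Dict.get?]
  induction l with
  | nil => simp
  | cons a l ih =>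
      by_cases h1 : a.1 = j <;> by_cases h2 : j = k <;> by_cases h3 : a.1 = k <;>
        simp_all

theorem pvF_nonneg (xs : List Int) (k v : Int) : 0 ≤ pvF xs k v := by
  have := pvCnt_nonneg xs v
  simp only [pvF]
  split_ifs <;> omega

theorem pvF_append_pos (xs : List Int) (k x : Int) (hpos : 0 < pvF xs k (k - x)) (v : Int) :
    pvF (xs ++ [x]) k v = if v = k - x then pvF xs k (k - x) - 1 else pvF xs k v := by
  have hkx : k - (k - x) = x := by ring
  have ha := pvCnt_nonneg xs x
  have hb := pvCnt_nonneg xs (k - x)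
  by_cases hvx : v = k - x
  · subst hvx
    by_cases hself : x = k - x
    · rw [← hself] at hpos ⊢
      simp only [pvF, pvCnt_append] at hpos ⊢
      split_ifs at * 
      omega
    · simp only [pvF, pvCnt_append, hkx] at hpos ⊢
      split_ifs at * <;> omega
  · by_cases hvx2 : v = x
    · subst hvx2
      simp only [pvF, pvCnt_append, hkx] at hpos ⊢
      split_ifs at * <;> omega
    · have hne : ¬ (k - v = x) := by omega
      simp only [pvF, pvCnt_append, hkx, if_neg hvx2, if_neg hne, add_zero]
      rw [if_neg hvx]

theorem pvF_append_nonpos (xs : List Int) (k x : Int) (hneg : ¬ 0 < pvF xs k (k - x)) (v : Int) :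
    pvF (xs ++ [x]) k v = if v = x then pvF xs k x + 1 else pvF xs k v := by
  have hkx : k - (k - x) = x := by ring
  have ha := pvCnt_nonneg xs x
  have hb := pvCnt_nonneg xs (k - x)
  by_cases hvx2 : v = x
  · subst hvx2
    by_cases hself : v = k - v
    · rw [← hself] at hneg
      simp only [pvF, pvCnt_append] at hneg ⊢
      split_ifs at * 
      omega
    · simp only [pvF, pvCnt_append, hkx] at hneg ⊢
      split_ifs at * <;> omega
  · by_cases hvx : v = k - x
    · subst hvx
      simp only [pvF, pvCnt_append, hkx] at hneg ⊢
      split_ifs at * 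
      omega
    · have hne : ¬ (k - v = x) := by omega
      simp only [pvF, pvCnt_append, if_neg hvx2, if_neg hne, add_zero]

theorem pv_get?_insert (d : PySem.Dict Int Int) (k v j : Int) :
    (d.insert k v).get? j = if j = k then some v else d.get? j :=
  PySem.Dict.get?_insert d k j v

def pvStepA (k : Int) (st : PySem.Dict Int Int × Int) (num : Int) : PySem.Dict Int Int × Int :=
  let ht := st.1
  let count := st.2
  if (ht.get? (k - num)).isSome then
    let v := ht.getD (k - num) 0 - 1
    let ht' := if v = 0 then ht.erase (k - num) else ht.insert (k - num) v
    (ht', count + 1)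
  else
    (ht.insert num (ht.getD num 0 + 1), count)

theorem pv_A_invariant (k : Int) (xs : List Int) :
    (∀ v, ((xs.foldl (pvStepA k) (PySem.Dict.empty, 0)).1.get? v
        = if 0 < pvF xs k v then some (pvF xs k v) else none))
    ∧ (xs.foldl (pvStepA k) (PySem.Dict.empty, 0)).2 = pvPhi xs k := by
  induction xs using List.reverseRecOn with
  | nil =>
      constructor
      · intro v
        have h0 : pvF [] k v = 0 := by simp [pvF, pvCnt]
        simp [h0, PySem.Dict.get?_empty]
      · simp [pvPhi]
  | append_singleton xs x ih =>
      obtain ⟨hd, hc⟩ := ih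
      rw [List.foldl_append, List.foldl_cons, List.foldl_nil]
      set st := xs.foldl (pvStepA k) (PySem.Dict.empty, 0) with hst
      by_cases hpos : 0 < pvF xs k (k - x)
      · have hsome : (st.1.get? (k - x)).isSome = true := by rw [hd]; simp [hpos]
        have hgetD : st.1.getD (k - x) 0 = pvF xs k (k - x) := by
          rw [PySem.Dict.getD_eq_get?_getD, hd]; simp [hpos]
        simp only [pvStepA, hsome, if_true, hgetD]
        constructor
        · intro v
          rw [pvF_append_pos xs k x hpos v]
          by_cases hval : pvF xs k (k - x) - 1 = 0
          · rw [if_pos hval, pv_get?_erase]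
            by_cases hv : v = k - x
            · rw [if_pos hv, hv, if_neg (by omega)]
            · rw [if_neg hv, if_neg hv, hd v]
          · rw [if_neg hval, pv_get?_insert]
            by_cases hv : v = k - x
            · rw [if_pos hv, if_pos hv,
                if_pos (show 0 < pvF xs k (k - x) - 1 by
                  have := pvF_nonneg xs k (k - x); omega)]
            · rw [if_neg hv, if_neg hv, hd v]
        · rw [pv_phi_append, if_pos hpos, hc]
      · have hnone : (st.1.get? (k - x)).isSome = false := by rw [hd]; simp [hpos]
        have hgetD : st.1.getD x 0 = pvF xs k x := by
          rw [PySem.Dict.getD_eq_get?_getD, hd]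
          have := pvF_nonneg xs k x
          split_ifs with h
          · rfl
          · simp; omega
        simp only [pvStepA, hnone, Bool.false_eq_true, if_false, hgetD]
        constructor
        · intro v
          rw [pvF_append_nonpos xs k x hpos v, pv_get?_insert]
          by_cases hv : v = x
          · rw [if_pos hv, if_pos hv,
              if_pos (by have := pvF_nonneg xs k x; omega)]
          · rw [if_neg hv, if_neg hv, hd v]
        · rw [pv_phi_append, if_neg hpos, hc]; ring

-- ===== VERDICT (by name: the statement is the Claim_ definition above) =====
theorem max_num_k_sum_pair_spec : Claim_equal_max_num_k_sum_pair := by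
  intro nums k _
  unfold Spec_max_num_k_sum_pair
  rw [pv_alt_eq_phi]
  show (nums.foldl (pvStepA k) (PySem.Dict.empty, 0)).2 = pvPhi nums k
  exact (pv_A_invariant k nums).2
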